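-- pv_equiv track=rewrite | github.com/honeyhyuni/algorithm | programmers_level4/trrainEdit.py | solution
-- ===== SOURCE A (Python) =====
-- def solution(land, P, Q):
--     arr = []
--     for i in land:
--         arr += i
--     arr.sort()
--     n = len(arr)
--     # 모든 칸을 제거 한 값
--     answer = sum(arr) * Q
--     # 가장 낮은 칸으로 모든 지형을 맞췄을때 값
--     cost = (sum(arr) - arr[0] * n) * Q
--     answer = min(answer, cost)
--     for i in range(1, len(arr)):
--         if arr[i] != arr[i-1]:
--             cost += (arr[i] - arr[i-1]) * i * P - (arr[i] - arr[i-1]) * (n-i) * Q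
--         answer = min(answer, cost)
--     return answer
-- ===== SOURCE B (Python) =====
-- def solution(land, P, Q):
--     tiles = [a for row in land for a in row]
--     best = sum(tiles) * Q  # remove everything
--     for h in set(tiles):   # candidate target heights: the distinct heights present
--         c = 0
--         for a in tiles:
--             if a > h:
--                 c += (a - h) * Q
--             elif a < h:
--                 c += (h - a) * P
--         best = min(best, c)
--     return best
-- ===== Notes on version B (the rewrite author's own statement) =====
-- stated objective: alternative
-- what changed: Replaces A's sort + incremental delta-cost sweep with independent from-scratch evaluation of the total cost for each distinct height present, keeping the running minimum.
-- crash fix: On terrain with no tiles (land empty or all rows empty) A raises IndexError at arr[0]; B returns 0 (nothing to add or remove). — e.g. on solution([[], []], 1, 1): A raises IndexError, B returns 0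
import Mathlib
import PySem

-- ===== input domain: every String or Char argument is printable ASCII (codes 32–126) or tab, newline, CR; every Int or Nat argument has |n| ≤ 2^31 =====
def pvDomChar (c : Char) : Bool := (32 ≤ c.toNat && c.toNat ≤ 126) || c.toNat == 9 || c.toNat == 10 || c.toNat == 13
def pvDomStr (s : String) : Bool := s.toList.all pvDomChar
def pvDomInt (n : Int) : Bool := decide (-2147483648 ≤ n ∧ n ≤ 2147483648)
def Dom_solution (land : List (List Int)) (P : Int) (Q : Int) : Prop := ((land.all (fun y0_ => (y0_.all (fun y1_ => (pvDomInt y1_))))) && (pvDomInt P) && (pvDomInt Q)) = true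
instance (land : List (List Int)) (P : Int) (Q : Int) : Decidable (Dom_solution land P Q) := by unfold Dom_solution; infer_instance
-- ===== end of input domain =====

-- B replaces A's sort + incremental cost sweep by an independent from-scratch cost
-- evaluation for each distinct height present (objective: alternative algorithm).

-- ===== PORT A =====
-- the 'for i in range(1, len(arr))' loop: structural recursion over the sorted tail,
-- carrying prev = arr[i-1], i, and the (answer, cost) state exactly as the Python does
def solGo (P Q n : Int) : Int → List Int → Int → Int → Int → Int
  | _, [], _, ans, _ => ans
  | prev, a :: rest, i, ans, cost =>
    let cost' := if a ≠ prev then cost + (a - prev) * i * P - (a - prev) * (n - i) * Q else cost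
    solGo P Q n a rest (i + 1) (min ans cost') cost'

def solution (land : List (List Int)) (P : Int) (Q : Int) : Int :=
  let arr := land.foldl (fun acc i => acc ++ i) []
  let s := PySem.List.sorted arr (fun x => x) false
  match s with
  | [] => 0  -- unreachable under Pre_solution: Python raises IndexError at arr[0]
  | h :: t =>
    let n : Int := ((h :: t).length : Int)
    let answer := (h :: t).sum * Q
    let cost := ((h :: t).sum - h * n) * Q
    solGo P Q n h t 1 (min answer cost) cost

-- ===== PORT B =====
-- the inner 'for a in tiles' accumulation of B
def tileCost (tiles : List Int) (P Q h : Int) : Int :=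
  tiles.foldl (fun c a => if a > h then c + (a - h) * Q else if a < h then c + (h - a) * P else c) 0

def solution_alt (land : List (List Int)) (P : Int) (Q : Int) : Int :=
  let tiles := land.flatten
  let best := tiles.sum * Q
  (PySem.Set.ofList tiles).foldl (fun best h => min best (tileCost tiles P Q h)) best

-- ===== PRECONDITION & SPEC =====
-- Pre_ excludes only the empty terrain (no tiles), on which the Python A raises IndexError at arr[0]
def Pre_solution (land : List (List Int)) (P : Int) (Q : Int) : Prop := land.flatten ≠ []
instance (land : List (List Int)) (P : Int) (Q : Int) : Decidable (Pre_solution land P Q) := by unfold Pre_solution; infer_instance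
def pvWitness_solution : List (List Int) × Int × Int := ([[1, 2], [3]], 4, 5)

-- On terrain with no tiles (land empty or all rows empty) A raises IndexError at arr[0]; B returns 0 (nothing to add or remove).
def Raises_solution (land : List (List Int)) (P : Int) (Q : Int) : Prop := land.flatten = []
instance (land : List (List Int)) (P : Int) (Q : Int) : Decidable (Raises_solution land P Q) := by unfold Raises_solution; infer_instance
def pvRaiseWitness_solution : List (List Int) × Int × Int := ([[], []], 1, 1)
def pvRaiseWitnessOut_solution : Int := 0

def Spec_solution (land : List (List Int)) (P : Int) (Q : Int) (out : Int) : Prop := out = solution_alt land P Q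
instance (land : List (List Int)) (P : Int) (Q : Int) (out : Int) : Decidable (Spec_solution land P Q out) := by unfold Spec_solution; infer_instance

-- ===== CLAIM (what is proved, stated in full; the proofs are below) =====
def Claim_equal_solution : Prop := ∀ (land : List (List Int)) (P : Int) (Q : Int), Dom_solution land P Q → Pre_solution land P Q → Spec_solution land P Q (solution land P Q)
def Claim_raises_solution : Prop := (∀ (land : List (List Int)) (P : Int) (Q : Int), Dom_solution land P Q → Raises_solution land P Q → ¬ Pre_solution land P Q) ∧ (Dom_solution (pvRaiseWitness_solution.1) (pvRaiseWitness_solution.2.1) (pvRaiseWitness_solution.2.2) ∧ Raises_solution (pvRaiseWitness_solution.1) (pvRaiseWitness_solution.2.1) (pvRaiseWitness_solution.2.2) ∧ solution_alt (pvRaiseWitness_solution.1) (pvRaiseWitness_solution.2.1) (pvRaiseWitness_solution.2.2) = pvRaiseWitnessOut_solution)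

-- ===== LEMMAS AND PROOFS =====

-- per-tile cost of levelling tile of height a to target height h
def tc (P Q h a : Int) : Int := if a > h then (a - h) * Q else if a < h then (h - a) * P else 0

-- total cost of levelling all tiles to height h
def C (tiles : List Int) (P Q h : Int) : Int := (tiles.map (tc P Q h)).sum

lemma tc_of_le (P Q h x : Int) (hx : x ≤ h) : tc P Q h x = (h - x) * P := by
  unfold tc; split_ifs with h1 h2
  · exfalso; omega
  · ring
  · have : x = h := by omega
    subst this; ring

lemma tc_of_ge (P Q h x : Int) (hx : h ≤ x) : tc P Q h x = (x - h) * Q := by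
  unfold tc; split_ifs with h1 h2
  · ring
  · exfalso; omega
  · have : x = h := by omega
    subst this; ring

lemma tileCost_eq (tiles : List Int) (P Q h : Int) : tileCost tiles P Q h = C tiles P Q h := by
  unfold tileCost C
  have h1 : tiles.foldl (fun c a => if a > h then c + (a - h) * Q else if a < h then c + (h - a) * P else c) 0
      = tiles.foldl (fun c a => c + tc P Q h a) 0 := by
    apply PySem.List.foldl_congr_mem
    intro acc x _
    unfold tc; split_ifs <;> ring
  rw [h1, PySem.List.foldl_add]
  ring

lemma C_perm {l1 l2 : List Int} (h : l1.Perm l2) (P Q x : Int) : C l1 P Q x = C l2 P Q x := by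
  unfold C; exact (h.map (tc P Q x)).sum_eq

lemma foldl_min_map (g : Int → Int) (l : List Int) (a : Int) :
    l.foldl (fun b x => min b (g x)) a = (l.map g).foldl min a := by
  induction l generalizing a with
  | nil => rfl
  | cons x xs ih => simp [List.foldl_cons, ih]

lemma foldl_min_eq_of_mem_iff (a : Int) (l1 l2 : List Int) (h : ∀ x, x ∈ l1 ↔ x ∈ l2) :
    l1.foldl min a = l2.foldl min a := by
  have le : ∀ (u v : List Int), (∀ x, x ∈ u → x ∈ v) → v.foldl min a ≤ u.foldl min a := by
    intro u v huv
    rcases PySem.List.foldl_min_mem u a with hm | hm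
    · rw [hm]; exact (PySem.List.foldl_min_le v a).1
    · exact (PySem.List.foldl_min_le v a).2 _ (huv _ hm)
  exact le_antisymm (le l2 l1 (fun x => (h x).mpr)) (le l1 l2 (fun x => (h x).mp))

lemma map_sum_shift (l : List Int) (g g' : Int → Int) (c : Int) (h : ∀ x ∈ l, g x = g' x + c) :
    (l.map g).sum = (l.map g').sum + (l.length : Int) * c := by
  induction l with
  | nil => simp
  | cons x xs ih =>
    simp only [List.map_cons, List.sum_cons, List.length_cons]
    rw [h x (by simp), ih (fun y hy => h y (by simp [hy]))]
    push_cast; ring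

-- cost of levelling everything to the minimum height
lemma C_head (s : List Int) (P Q h0 : Int) (hle : ∀ x ∈ s, h0 ≤ x) :
    C s P Q h0 = (s.sum - h0 * (s.length : Int)) * Q := by
  unfold C
  have h1 : (s.map (tc P Q h0)).sum = (s.map (fun _ => (0 : Int))).sum + (s.length : Int) * 0
      + ((s.map (fun x => (x - h0) * Q)).sum) := by
    have : ∀ x ∈ s, tc P Q h0 x = (x - h0) * Q := by
      intro x hx
      exact tc_of_ge P Q h0 x (hle x hx)
    rw [List.map_congr_left this]; simp
  rw [h1]
  have h2 : ∀ (l : List Int), (l.map (fun x => (x - h0) * Q)).sum = (l.sum - h0 * (l.length : Int)) * Q := by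
    intro l
    induction l with
    | nil => simp
    | cons x xs ih => simp only [List.map_cons, List.sum_cons, List.length_cons]; rw [ih]; push_cast; ring
  rw [h2]; simp

-- A's incremental recurrence is exact: the cost at the next distinct height
lemma C_step (l1 l2 : List Int) (prev a P Q : Int)
    (hp : (l1 ++ prev :: a :: l2).Pairwise (· ≤ ·)) (hlt : prev < a) :
    C (l1 ++ prev :: a :: l2) P Q a
      = C (l1 ++ prev :: a :: l2) P Q prev
        + (a - prev) * ((l1.length : Int) + 1) * P
        - (a - prev) * ((l2.length : Int) + 1) * Q := by
  have hl1 : ∀ x ∈ l1, x ≤ prev := by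
    intro x hx
    exact (List.pairwise_append.mp hp).2.2 x hx prev (by simp)
  have hl2 : ∀ x ∈ l2, a ≤ x := by
    have := (List.pairwise_append.mp hp).2.1
    have h' := (List.pairwise_cons.mp this).2
    exact fun x hx => (List.pairwise_cons.mp h').1 x hx
  unfold C
  simp only [List.map_append, List.sum_append, List.map_cons, List.sum_cons]
  have e1 : (l1.map (tc P Q a)).sum = (l1.map (tc P Q prev)).sum + (l1.length : Int) * ((a - prev) * P) := by
    apply map_sum_shift
    intro x hx
    have hxp := hl1 x hx
    rw [tc_of_le P Q a x (by omega), tc_of_le P Q prev x (by omega)]; ring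
  have e2 : (l2.map (tc P Q a)).sum = (l2.map (tc P Q prev)).sum + (l2.length : Int) * (-((a - prev) * Q)) := by
    apply map_sum_shift
    intro x hx
    have hxa := hl2 x hx
    rw [tc_of_ge P Q a x (by omega), tc_of_ge P Q prev x (by omega)]; ring
  have e3 : tc P Q a prev = tc P Q prev prev + (a - prev) * P := by
    rw [tc_of_le P Q a prev (by omega), tc_of_le P Q prev prev (by omega)]; ring
  have e4 : tc P Q a a = tc P Q prev a - (a - prev) * Q := by
    rw [tc_of_ge P Q a a (by omega), tc_of_ge P Q prev a (by omega)]; ring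
  rw [e1, e2, e3, e4]; ring

-- loop invariant for A's sweep
lemma go_spec (P Q : Int) (s : List Int) (hs : s.Pairwise (· ≤ ·)) :
    ∀ (l2 l1 : List Int) (prev : Int), s = l1 ++ prev :: l2 →
    ∀ (ans cost : Int), cost = C s P Q prev →
    solGo P Q (s.length : Int) prev l2 ((l1.length : Int) + 1) ans cost
      = (l2.map (C s P Q)).foldl min ans := by
  intro l2
  induction l2 with
  | nil => intro l1 prev _ ans cost _; rfl
  | cons a rest ih =>
    intro l1 prev hdecomp ans cost hcost
    have hp : prev ≤ a := by
      subst hdecomp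
      have := (List.pairwise_append.mp hs).2.1
      exact (List.pairwise_cons.mp this).1 a (by simp)
    have hlen : (s.length : Int) - ((l1.length : Int) + 1) = (rest.length : Int) + 1 := by
      subst hdecomp; simp
    have hcost' :
        (if a ≠ prev then cost + (a - prev) * ((l1.length : Int) + 1) * P
            - (a - prev) * ((s.length : Int) - ((l1.length : Int) + 1)) * Q else cost)
          = C s P Q a := by
      by_cases h : a = prev
      · simp [h, hcost]
      · have hlt : prev < a := lt_of_le_of_ne hp (fun e => h e.symm)
        rw [if_pos (by exact fun e => h e), hlen, hcost, hdecomp]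
        rw [C_step l1 rest prev a P Q (hdecomp ▸ hs) hlt]
        try ring
    show solGo P Q (s.length : Int) prev (a :: rest) ((l1.length : Int) + 1) ans cost
        = ((a :: rest).map (C s P Q)).foldl min ans
    rw [solGo]
    simp only [hcost']
    have hdecomp' : s = (l1 ++ [prev]) ++ a :: rest := by rw [hdecomp]; simp
    have hlen' : ((l1.length : Int) + 1) + 1 = (((l1 ++ [prev]).length : Int) + 1) := by
      simp
    rw [hlen', ih (l1 ++ [prev]) a hdecomp' (min ans (C s P Q a)) (C s P Q a) rfl]
    simp [List.foldl_cons]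

-- ===== VERDICT (by name: the statement is the Claim_ definition above) =====
theorem solution_spec : Claim_equal_solution := by
  intro land P Q _ hpre
  unfold Spec_solution solution solution_alt Pre_solution at *
  simp only [PySem.List.foldl_append_eq_flatten, List.nil_append]
  set tiles := land.flatten with htiles
  set s := PySem.List.sorted tiles (fun x => x) false with hsdef
  have hperm : s.Perm tiles := PySem.List.sorted_perm tiles (fun x => x) false
  have hpair : s.Pairwise (· ≤ ·) := PySem.List.sorted_pairwise tiles (fun x => x)
  have hsne : s ≠ [] := by
    intro h; exact hpre ((PySem.List.sorted_eq_nil_iff tiles (fun x => x) false).mp h)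
  -- B's value: foldl min over C of the distinct heights
  have hB : (PySem.Set.ofList tiles).foldl (fun best h => min best (tileCost tiles P Q h)) (tiles.sum * Q)
      = ((PySem.Set.ofList tiles).map (C s P Q)).foldl min (tiles.sum * Q) := by
    have : ∀ h, tileCost tiles P Q h = C s P Q h := by
      intro h; rw [tileCost_eq]; exact C_perm hperm.symm P Q h
    calc (PySem.Set.ofList tiles).foldl (fun best h => min best (tileCost tiles P Q h)) (tiles.sum * Q)
        = (PySem.Set.ofList tiles).foldl (fun best h => min best (C s P Q h)) (tiles.sum * Q) := by
          apply PySem.List.foldl_congr_mem; intro acc x _; rw [this]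
      _ = ((PySem.Set.ofList tiles).map (C s P Q)).foldl min (tiles.sum * Q) :=
          foldl_min_map (C s P Q) _ _
  rw [hB]
  obtain ⟨h0, t, hst⟩ := List.exists_cons_of_ne_nil hsne
  rw [hst]
  show solGo P Q (((h0 :: t).length : Nat) : Int) h0 t 1
      (min ((h0 :: t).sum * Q) (((h0 :: t).sum - h0 * (((h0 :: t).length : Nat) : Int)) * Q))
      (((h0 :: t).sum - h0 * (((h0 :: t).length : Nat) : Int)) * Q)
    = ((PySem.Set.ofList tiles).map (C (h0 :: t) P Q)).foldl min (tiles.sum * Q)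
  have hsum : (h0 :: t).sum = tiles.sum := by rw [← hst]; exact hperm.sum_eq
  have hhead : ∀ x ∈ h0 :: t, h0 ≤ x := by
    intro x hx
    rcases List.mem_cons.mp hx with rfl | hx
    · exact le_refl _
    · exact (List.pairwise_cons.mp (hst ▸ hpair)).1 x hx
  have hcost0 : ((h0 :: t).sum - h0 * ((h0 :: t).length : Int)) * Q = C (h0 :: t) P Q h0 := by
    rw [C_head (h0 :: t) P Q h0 hhead]
  rw [hst] at hB
  rw [hcost0]
  have hgo := go_spec P Q s hpair t [] h0 (by rw [hst]; rfl)
    (min ((h0 :: t).sum * Q) (C s P Q h0)) (C s P Q h0) rfl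
  simp only [List.length_nil, Nat.cast_zero, zero_add] at hgo
  rw [hst] at hgo
  rw [hgo]
  have hfold : (t.map (C (h0 :: t) P Q)).foldl min (min ((h0 :: t).sum * Q) (C (h0 :: t) P Q h0))
      = ((h0 :: t).map (C (h0 :: t) P Q)).foldl min ((h0 :: t).sum * Q) := by
    simp [List.foldl_cons]
  rw [hfold, hsum]
  apply foldl_min_eq_of_mem_iff
  intro x
  simp only [List.mem_map]
  constructor
  · rintro ⟨y, hy, rfl⟩
    exact ⟨y, (PySem.Set.mem_ofList tiles y).mpr (hperm.mem_iff.mp (hst ▸ hy)), rfl⟩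
  · rintro ⟨y, hy, rfl⟩
    exact ⟨y, hst ▸ (hperm.mem_iff.mpr ((PySem.Set.mem_ofList tiles y).mp hy)), rfl⟩

@[simp] theorem solution_raises : Claim_raises_solution := by
  unfold Claim_raises_solution
  exact ⟨fun land P Q _ hr hp => hp hr, by decide⟩
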